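-- pv_equiv track=rewrite | github.com/circleolami/Simple-FLPCP | TestFLIOP.py | compute_degrees
-- ===== SOURCE A (Python) =====
-- def compute_degrees(n: int):
--     dp = [0] * (n + 1)
--     degrees = [0] * n
--
--     # Initialize the dp array
--     for i in range(1, n + 1):
--         dp[i] = i
--         degrees[i - 1] = 1
--
--     # Dynamic Programming to calculate optimal degrees
--     for i in range(2, n + 1):
--         for j in range(1, i):
--             if i % j == 0:
--                 if dp[i // j] + 1 < dp[i]:
--                     dp[i] = dp[i // j] + 1
--                     degrees[i - 1] = j
--
--     return degrees
-- ===== SOURCE B (Python) =====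
-- def compute_degrees(n: int):
--     # degrees[i-1] is i's largest proper divisor (1 for i = 1 and for primes),
--     # found directly by trial division up to sqrt(i) -- no dp table, no inner divisor scan.
--     degrees = []
--     for i in range(1, n + 1):
--         d = 2
--         while d * d <= i and i % d != 0:
--             d += 1
--         degrees.append(i // d if i % d == 0 else 1)
--     return degrees
-- ===== Notes on version B (the rewrite author's own statement) =====
-- stated objective: faster
-- what changed: B drops the dp table and the O(i) divisor scan per i entirely: A's DP provably yields degrees[i-1] = i // spf(i) (the largest proper divisor), which B computes directly by trial division up to sqrt(i).
import Mathlib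
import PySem

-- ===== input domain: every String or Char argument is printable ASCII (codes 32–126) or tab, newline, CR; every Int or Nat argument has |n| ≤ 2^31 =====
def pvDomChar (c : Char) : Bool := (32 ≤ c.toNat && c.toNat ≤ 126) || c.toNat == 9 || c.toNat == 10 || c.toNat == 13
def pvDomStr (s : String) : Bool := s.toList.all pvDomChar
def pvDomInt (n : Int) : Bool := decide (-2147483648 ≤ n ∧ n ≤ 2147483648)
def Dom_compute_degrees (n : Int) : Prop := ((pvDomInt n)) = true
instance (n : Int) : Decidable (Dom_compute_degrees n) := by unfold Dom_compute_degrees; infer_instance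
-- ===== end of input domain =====

-- B replaces A's O(n^2) dp/divisor-scan with direct trial division up to sqrt(i)
-- (A's dp provably yields degrees[i-1] = i // smallest_factor(i)): asymptotically faster.

-- ===== PORT A =====
-- literal transliteration of A; dp/degrees index assignments use pySetD and reads pyGetD
-- (all indices are provably in range, so the total forms are exact here)
def pvAInit (st : List Int × List Int) (i : Int) : List Int × List Int :=
  (PySem.List.pySetD st.1 i i, PySem.List.pySetD st.2 (i - 1) 1)

def pvAInner (i : Int) (st2 : List Int × List Int) (j : Int) : List Int × List Int :=
  if PySem.Int.mod i j = 0 then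
    if PySem.List.pyGetD st2.1 (PySem.Int.floordiv i j) 0 + 1 < PySem.List.pyGetD st2.1 i 0 then
      (PySem.List.pySetD st2.1 i (PySem.List.pyGetD st2.1 (PySem.Int.floordiv i j) 0 + 1),
       PySem.List.pySetD st2.2 (i - 1) j)
    else st2
  else st2

def pvAOuter (st : List Int × List Int) (i : Int) : List Int × List Int :=
  (PySem.List.pyRange 1 i 1).foldl (pvAInner i) st

def compute_degrees (n : Int) : List Int :=
  let dp := PySem.List.pyRepeat [(0 : Int)] (n + 1)
  let degrees := PySem.List.pyRepeat [(0 : Int)] n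
  let init := (PySem.List.pyRange 1 (n + 1) 1).foldl pvAInit (dp, degrees)
  let final := (PySem.List.pyRange 2 (n + 1) 1).foldl pvAOuter init
  final.2

-- ===== PORT B =====
-- the 'while d * d <= i and i % d != 0: d += 1' loop of Source B
def pvSpfSearch (i d : Int) : Int :=
  if h : d * d ≤ i ∧ PySem.Int.mod i d ≠ 0 then pvSpfSearch i (d + 1) else d
termination_by (i + 1 - d).toNat
decreasing_by
  have hdi : d ≤ i := by nlinarith [h.1]
  omega

def compute_degrees_alt (n : Int) : List Int :=
  (PySem.List.pyRange 1 (n + 1) 1).foldl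
    (fun acc i =>
      let d := pvSpfSearch i 2
      acc ++ [if PySem.Int.mod i d = 0 then PySem.Int.floordiv i d else 1]) []

-- ===== PRECONDITION & SPEC =====
def Spec_compute_degrees (n : Int) (out : List Int) : Prop := out = compute_degrees_alt n
instance (n : Int) (out : List Int) : Decidable (Spec_compute_degrees n out) := by unfold Spec_compute_degrees; infer_instance

-- ===== CLAIM (what is proved, stated in full; the proofs are below) =====
def Claim_equal_compute_degrees : Prop := ∀ (n : Int), Dom_compute_degrees n → Spec_compute_degrees n (compute_degrees n)

-- ===== LEMMAS AND PROOFS =====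

-- the common value: degrees[i-1] = i / minFac i (largest proper divisor; 1 for 1 and primes)
def pvG (k : Nat) : Nat := k / k.minFac
-- the dp value A's inner loop converges to
def pvF (k : Nat) : Nat := if k / k.minFac ≤ 1 then k else k.minFac + 1

-- canonical shapes of A's two arrays during the outer loop: cells below c are final,
-- cell c (resp. c-1 in degrees) holds the working value, cells above are untouched
def pvDpL (N c : Nat) (v : Int) : List Int :=
  (List.range (N + 1)).map (fun k => if k < c then (pvF k : Int) else if k = c then v else (k : Int))

def pvDegL (N c : Nat) (d : Int) : List Int :=
  (List.range N).map (fun k => if k + 1 < c then (pvG (k + 1) : Int) else if k + 1 = c then d else 1)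

-- A's inner-loop step, abstracted to the only two cells it can change
def pvAstep (m : Nat) (p : Int × Int) (j : Int) : Int × Int :=
  if j.toNat ∣ m then
    if (pvF (m / j.toNat) : Int) + 1 < p.1 then ((pvF (m / j.toNat) : Int) + 1, j) else p
  else p

lemma pv_set_map_range {L c : Nat} (f : Nat → Int) (v : Int) (_h : c < L) :
    ((List.range L).map f).set c v = (List.range L).map (fun k => if k = c then v else f k) := by
  apply List.ext_getElem
  · simp
  · intro i h1 h2
    simp only [List.getElem_set, List.getElem_map, List.getElem_range]
    simp only [List.length_set, List.length_map, List.length_range] at h1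
    by_cases hic : i = c
    · simp [hic]
    · simp [hic, Ne.symm hic]


lemma pvDpL_get (N c q : Nat) (v : Int) (hq : q ≤ N) :
    PySem.List.pyGetD (pvDpL N c v) (q : Int) 0 =
      if q < c then (pvF q : Int) else if q = c then v else (q : Int) := by
  rw [PySem.List.pyGetD_natCast]; unfold pvDpL
  rw [PySem.List.getD_map_range _ _ _ _ (by omega)]

lemma pvDpL_set (N c : Nat) (v v' : Int) (hc : c ≤ N) :
    PySem.List.pySetD (pvDpL N c v) (c : Int) v' = pvDpL N c v' := by
  rw [PySem.List.pySetD_natCast]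
  unfold pvDpL
  rw [pv_set_map_range _ _ (by omega)]
  apply List.map_congr_left
  intro k hk
  simp only [List.mem_range] at hk
  by_cases h1 : k = c
  · simp [h1]
  · simp [h1]


lemma pvDegL_set (N c : Nat) (d d' : Int) (h1 : 1 ≤ c) (hc : c ≤ N) :
    PySem.List.pySetD (pvDegL N c d) ((c : Int) - 1) d' = pvDegL N c d' := by
  have hidx : ((c : Int) - 1) = ((c - 1 : Nat) : Int) := by omega
  rw [hidx, PySem.List.pySetD_natCast]
  unfold pvDegL
  rw [pv_set_map_range _ _ (by omega)]
  apply List.map_congr_left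
  intro k hk
  simp only [List.mem_range] at hk
  by_cases h1 : k = c - 1
  · subst h1
    have e1 : ¬ (c - 1 + 1 < c) := by omega
    have e2 : c - 1 + 1 = c := by omega
    simp [e2]
  · have h2 : k + 1 ≠ c := by omega
    simp [h1, h2]


lemma pv_q_bounds (m j : Nat) (hj2 : 2 ≤ j) (hjm : j < m) (hd : j ∣ m) :
    2 ≤ m / j ∧ m / j < m := by
  obtain ⟨t, ht⟩ := hd
  have ht2 : 2 ≤ t := by nlinarith
  have hq : m / j = t := by rw [ht]; exact Nat.mul_div_cancel_left t (by omega)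
  constructor
  · omega
  · rw [hq]; nlinarith


lemma pv_key (m j : Nat) (hj2 : 2 ≤ j) (hjm : j < m) (hd : j ∣ m) :
    m.minFac ≤ pvF (m / j) ∧ (j ≠ m / m.minFac → m.minFac < pvF (m / j)) := by
  have hm0 : m ≠ 0 := by omega
  have hq : m / j ∣ m := Nat.div_dvd_of_dvd hd
  obtain ⟨hq2, hqm⟩ := pv_q_bounds m j hj2 hjm hd
  have hmj : m / (m / j) = j := Nat.div_div_self hd hm0
  unfold pvF
  by_cases hc : m / j / (m / j).minFac ≤ 1
  · -- m / j is prime (or would be 1, impossible since 2 ≤ m / j)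
    have hple : m.minFac ≤ m / j := Nat.minFac_le_of_dvd hq2 hq
    refine ⟨by simp [hc]; omega, ?_⟩
    intro hne
    rw [if_pos hc]
    rcases Nat.lt_or_ge m.minFac (m / j) with h | h
    · exact h
    · exfalso
      have : m.minFac = m / j := by omega
      apply hne
      rw [← hmj, ← this]
  · -- m / j is composite: its minFac is a factor of m, so ≥ m.minFac, and pvF (m/j) = minFac + 1
    rw [if_neg hc]
    have h1 : (m / j).minFac ∣ m := dvd_trans (Nat.minFac_dvd _) hq
    have h2 : 2 ≤ (m / j).minFac := (Nat.minFac_prime (by omega)).two_le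
    have h3 : m.minFac ≤ (m / j).minFac := Nat.minFac_le_of_dvd h2 h1
    exact ⟨by omega, fun _ => by omega⟩


lemma pv_inner_step (N m : Nat) (hm2 : 2 ≤ m) (hmN : m ≤ N) (j : Int)
    (hj2 : 2 ≤ j) (hjm : j < (m : Int)) (v d : Int) :
    pvAInner (m : Int) (pvDpL N m v, pvDegL N m d) j =
      (pvDpL N m (pvAstep m (v, d) j).1, pvDegL N m (pvAstep m (v, d) j).2) := by
  have hj0 : (0:Int) ≤ j := by omega
  obtain ⟨jn, rfl⟩ : ∃ jn : Nat, j = (jn : Int) := ⟨j.toNat, (Int.toNat_of_nonneg hj0).symm⟩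
  have hjn2 : 2 ≤ jn := by omega
  have hjnm : jn < m := by omega
  unfold pvAInner pvAstep
  rw [PySem.Int.mod_natCast, PySem.Int.floordiv_natCast, Int.toNat_natCast]
  by_cases hdvd : jn ∣ m
  · have hmod : m % jn = 0 := Nat.dvd_iff_mod_eq_zero.mp hdvd
    obtain ⟨hq2, hqm⟩ := pv_q_bounds m jn hjn2 hjnm hdvd
    have hget1 : PySem.List.pyGetD (pvDpL N m v) ((m / jn : Nat) : Int) 0 = (pvF (m / jn) : Int) := by
      rw [pvDpL_get N m (m / jn) v (by omega)]
      rw [if_pos hqm]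
    have hget2 : PySem.List.pyGetD (pvDpL N m v) ((m : Nat) : Int) 0 = v := by
      rw [pvDpL_get N m m v (by omega)]
      simp
    rw [if_pos (by rw [hmod]; rfl), hget1, hget2, if_pos hdvd]
    by_cases hlt : (pvF (m / jn) : Int) + 1 < v
    · rw [if_pos hlt, if_pos hlt]
      simp only
      rw [pvDpL_set N m v _ (by omega), pvDegL_set N m d _ (by omega) (by omega)]
    · rw [if_neg hlt, if_neg hlt]
  · have hmod : m % jn ≠ 0 := fun h => hdvd (Nat.dvd_of_mod_eq_zero h)
    rw [if_neg hdvd, if_neg (by exact_mod_cast hmod)]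

lemma pv_inner_sim (N m : Nat) (hm2 : 2 ≤ m) (hmN : m ≤ N) (js : List Int)
    (hjs : ∀ j ∈ js, 2 ≤ j ∧ j < (m : Int)) (v d : Int) :
    js.foldl (pvAInner (m : Int)) (pvDpL N m v, pvDegL N m d) =
      (pvDpL N m (js.foldl (pvAstep m) (v, d)).1, pvDegL N m (js.foldl (pvAstep m) (v, d)).2) := by
  induction js generalizing v d with
  | nil => rfl
  | cons j js ih =>
    obtain ⟨hj2, hjm⟩ := hjs j (List.mem_cons_self)
    simp only [List.foldl_cons]
    rw [pv_inner_step N m hm2 hmN j hj2 hjm v d]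
    rcases hst : pvAstep m (v, d) j with ⟨v', d'⟩
    exact ih (fun x hx => hjs x (List.mem_cons_of_mem _ hx)) v' d'


lemma pv_abs_P1 (m : Nat) (_hm2 : 2 ≤ m) (js : List Int)
    (h : ∀ j ∈ js, 2 ≤ j ∧ j < (m : Int) ∧ j ≠ ((m / m.minFac : Nat) : Int)) :
    ∀ p : Int × Int, (m.minFac : Int) + 1 < p.1 →
      (m.minFac : Int) + 1 < (js.foldl (pvAstep m) p).1 := by
  induction js with
  | nil => intro p hp; exact hp
  | cons j js ih =>
    intro p hp
    obtain ⟨hj2, hjm, hjne⟩ := h j (List.mem_cons_self)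
    have hrest := fun x hx => h x (List.mem_cons_of_mem _ hx)
    simp only [List.foldl_cons]
    apply ih hrest
    unfold pvAstep
    by_cases hdvd : j.toNat ∣ m
    · have hjj : j = ((j.toNat : Nat) : Int) := by omega
      have hk := (pv_key m j.toNat (by omega) (by omega) hdvd).2 (by
        intro hcontra
        apply hjne
        rw [hjj, hcontra])
      by_cases hlt : (pvF (m / j.toNat) : Int) + 1 < p.1
      · rw [if_pos hdvd, if_pos hlt]
        simp only
        exact_mod_cast by omega
      · rw [if_pos hdvd, if_neg hlt]; exact hp
    · rw [if_neg hdvd]; exact hp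


lemma pv_abs_P2 (m : Nat) (hm2 : 2 ≤ m) (_hg : 2 ≤ pvG m) (p : Int × Int)
    (hp : (m.minFac : Int) + 1 < p.1) :
    pvAstep m p ((pvG m : Nat) : Int) = ((m.minFac : Int) + 1, ((pvG m : Nat) : Int)) := by
  have hm0 : m ≠ 0 := by omega
  have hg1 : pvG m ∣ m := Nat.div_dvd_of_dvd (Nat.minFac_dvd m)
  have hmdiv : m / pvG m = m.minFac := Nat.div_div_self (Nat.minFac_dvd m) hm0
  have hprime : (m.minFac).Prime := Nat.minFac_prime (by omega)
  have hF : pvF m.minFac = m.minFac := by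
    unfold pvF
    rw [hprime.minFac_eq, Nat.div_self hprime.pos]
    simp
  unfold pvAstep
  rw [Int.toNat_natCast, if_pos hg1, hmdiv, hF, if_pos hp]


lemma pv_abs_P3 (m : Nat) (_hm2 : 2 ≤ m) (js : List Int)
    (h : ∀ j ∈ js, 2 ≤ j ∧ j < (m : Int)) (d : Int) :
    js.foldl (pvAstep m) ((m.minFac : Int) + 1, d) = ((m.minFac : Int) + 1, d) := by
  induction js with
  | nil => rfl
  | cons j js ih =>
    obtain ⟨hj2, hjm⟩ := h j (List.mem_cons_self)
    simp only [List.foldl_cons]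
    have hstep : pvAstep m ((m.minFac : Int) + 1, d) j = ((m.minFac : Int) + 1, d) := by
      unfold pvAstep
      by_cases hdvd : j.toNat ∣ m
      · have hk := (pv_key m j.toNat (by omega) (by omega) hdvd).1
        rw [if_pos hdvd, if_neg (by simp only; exact_mod_cast by omega)]
      · rw [if_neg hdvd]
    rw [hstep]
    exact ih (fun x hx => h x (List.mem_cons_of_mem _ hx))


lemma pv_abs (m : Nat) (hm2 : 2 ≤ m) :
    (PySem.List.pyRange 2 (m : Int) 1).foldl (pvAstep m) ((m : Int), 1) =
      ((pvF m : Int), (pvG m : Int)) := by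
  have hmf2 : 2 ≤ m.minFac := (Nat.minFac_prime (by omega)).two_le
  have hmfd : m.minFac ∣ m := Nat.minFac_dvd m
  have hmul : m.minFac * pvG m = m := Nat.mul_div_cancel' hmfd
  have hgdef : pvG m = m / m.minFac := rfl
  rcases Nat.lt_or_ge (pvG m) 2 with hg | hg
  · -- m is prime: no j in [2, m) divides m, the fold is the identity
    have hg1 : pvG m = 1 := by
      rcases (by omega : pvG m = 0 ∨ pvG m = 1) with h | h
      · rw [h, Nat.mul_zero] at hmul; omega
      · exact h
    have hgm : m.minFac = m := by rw [hg1, Nat.mul_one] at hmul; exact hmul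
    have hp : m.Prime := by rw [← hgm]; exact Nat.minFac_prime (by omega)
    have hid : (PySem.List.pyRange 2 (m : Int) 1).foldl (pvAstep m) ((m : Int), 1) =
        (PySem.List.pyRange 2 (m : Int) 1).foldl (fun acc _ => acc) ((m : Int), 1) := by
      apply PySem.List.foldl_congr_mem
      intro acc j hj
      rw [PySem.List.mem_pyRange_one] at hj
      unfold pvAstep
      rw [if_neg]
      intro hdvd
      rcases (Nat.Prime.eq_one_or_self_of_dvd hp _ hdvd) with h | h <;> omega
    rw [hid, PySem.List.foldl_ignore]
    have hF : pvF m = m := by unfold pvF; rw [if_pos (by omega)]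
    rw [hF, hg1]
    norm_num
  · -- m is composite: unique minimum at j₀ = m / minFac m
    have hj0m : pvG m < m := Nat.div_lt_self (by omega) (by omega)
    have hmge : m.minFac + 2 ≤ m := by nlinarith
    rw [PySem.List.pyRange_one_append 2 ((pvG m : Nat) : Int) (m : Int) (by omega) (by omega),
        PySem.List.pyRange_one_append ((pvG m : Nat) : Int) (((pvG m : Nat) : Int) + 1) (m : Int)
          (by omega) (by omega),
        PySem.List.pyRange_one_singleton]
    rw [List.foldl_append, List.foldl_append]
    have hP1 : (m.minFac : Int) + 1 <
        ((PySem.List.pyRange 2 ((pvG m : Nat) : Int) 1).foldl (pvAstep m) ((m : Int), 1)).1 := by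
      apply pv_abs_P1 m hm2
      · intro j hj
        rw [PySem.List.mem_pyRange_one] at hj
        exact ⟨hj.1, by omega, by omega⟩
      · push_cast; omega
    rcases hst : (PySem.List.pyRange 2 ((pvG m : Nat) : Int) 1).foldl (pvAstep m) ((m : Int), 1)
      with ⟨v1, d1⟩
    rw [hst] at hP1
    simp only [List.foldl_cons, List.foldl_nil]
    rw [pv_abs_P2 m hm2 hg _ hP1]
    rw [pv_abs_P3 m hm2 _ (by
      intro j hj
      rw [PySem.List.mem_pyRange_one] at hj
      exact ⟨by omega, hj.2⟩) _]
    have hF : pvF m = m.minFac + 1 := by unfold pvF; rw [if_neg (by omega)]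
    rw [hF]
    push_cast
    ring_nf


lemma pv_inner (N m : Nat) (hm2 : 2 ≤ m) (hmN : m ≤ N) :
    pvAOuter (pvDpL N m (m : Int), pvDegL N m 1) (m : Int) =
      (pvDpL N m ((pvF m : Nat) : Int), pvDegL N m ((pvG m : Nat) : Int)) := by
  unfold pvAOuter
  rw [PySem.List.pyRange_one_cons (by omega : (1 : Int) < (m : Int))]
  simp only [List.foldl_cons]
  have hm1 : PySem.Int.mod (m : Int) 1 = 0 := by simp
  have hf1 : PySem.Int.floordiv (m : Int) 1 = (m : Int) := by simp
  have h1 : pvAInner (m : Int) (pvDpL N m (m : Int), pvDegL N m 1) 1 =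
      (pvDpL N m (m : Int), pvDegL N m 1) := by
    unfold pvAInner
    rw [hm1, if_pos rfl, hf1]
    rw [pvDpL_get N m m _ (by omega)]
    simp
  rw [h1]
  have h2 : (1 : Int) + 1 = 2 := by norm_num
  rw [h2]
  rw [pv_inner_sim N m hm2 hmN _ (by
    intro j hj
    rw [PySem.List.mem_pyRange_one] at hj
    exact ⟨hj.1, hj.2⟩) (m : Int) 1]
  rw [pv_abs m hm2]


lemma pvDpL_shift (N m : Nat) : pvDpL N m ((pvF m : Nat) : Int) = pvDpL N (m + 1) ((m + 1 : Nat) : Int) := by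
  unfold pvDpL
  apply List.map_congr_left
  intro k hk
  simp only [List.mem_range] at hk
  by_cases h1 : k < m
  · rw [if_pos h1, if_pos (by omega)]
  · by_cases h2 : k = m
    · subst h2
      rw [if_neg h1, if_pos rfl, if_pos (by omega)]
    · by_cases h3 : k = m + 1
      · subst h3
        rw [if_neg h1, if_neg h2, if_neg (by omega), if_pos rfl]
      · rw [if_neg h1, if_neg h2, if_neg (by omega), if_neg h3]


lemma pvDegL_shift (N m : Nat) : pvDegL N m ((pvG m : Nat) : Int) = pvDegL N (m + 1) 1 := by
  unfold pvDegL
  apply List.map_congr_left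
  intro k hk
  simp only [List.mem_range] at hk
  by_cases h1 : k + 1 < m
  · rw [if_pos h1, if_pos (by omega)]
  · by_cases h2 : k + 1 = m
    · rw [if_neg h1, if_pos h2, if_pos (by omega), h2]
    · by_cases h3 : k + 1 = m + 1
      · rw [if_neg h1, if_neg h2, if_neg (by omega), if_pos h3]
      · rw [if_neg h1, if_neg h2, if_neg (by omega), if_neg h3]


lemma pv_outer (N m : Nat) (hm2 : 2 ≤ m) (hmN : m ≤ N + 1) :
    (PySem.List.pyRange 2 (m : Int) 1).foldl pvAOuter (pvDpL N 2 2, pvDegL N 2 1) =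
      (pvDpL N m (m : Int), pvDegL N m 1) := by
  induction m, hm2 using Nat.le_induction with
  | base =>
    rw [PySem.List.pyRange_one_eq_nil (by norm_num)]
    norm_num
  | succ m hm ih =>
    have hmN : m ≤ N := by omega
    have hcast : ((m + 1 : Nat) : Int) = (m : Int) + 1 := by push_cast; ring
    rw [hcast, PySem.List.pyRange_one_succ_right (by omega), List.foldl_append,
        ih (by omega)]
    simp only [List.foldl_cons, List.foldl_nil]
    rw [pv_inner N m hm hmN, pvDpL_shift, pvDegL_shift, ← hcast]


lemma pv_map_eq_replicate (L : Nat) (g : Nat → Int) (c : Int) (h : ∀ k, k < L → g k = c) :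
    (List.range L).map g = List.replicate L c := by
  apply List.ext_getElem
  · simp
  · intro i h1 h2
    simp only [List.getElem_map, List.getElem_range, List.getElem_replicate]
    exact h i (by simpa using h1)

lemma pv_init (N : Nat) : ∀ m : Nat, m ≤ N + 1 →
    (PySem.List.pyRange 1 (m : Int) 1).foldl pvAInit
        (List.replicate (N + 1) (0 : Int), List.replicate N (0 : Int)) =
      ((List.range (N + 1)).map (fun k => if k < m then (k : Int) else 0),
       (List.range N).map (fun k => if k + 1 < m then (1 : Int) else 0)) := by
  intro m
  induction m with
  | zero =>
    intro _
    rw [Nat.cast_zero, PySem.List.pyRange_one_eq_nil (by norm_num)]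
    simp only [List.foldl_nil]
    rw [pv_map_eq_replicate _ _ _ (fun k hk => by rw [if_neg (by omega)]),
        pv_map_eq_replicate _ _ _ (fun k hk => by rw [if_neg (by omega)])]
  | succ m ih =>
    intro hm
    rcases Nat.eq_zero_or_pos m with hm0 | hm1
    · subst hm0
      rw [Nat.cast_one, PySem.List.pyRange_one_eq_nil (by norm_num)]
      simp only [List.foldl_nil]
      rw [pv_map_eq_replicate _ _ 0 (fun k hk => by
            rcases Nat.eq_zero_or_pos k with h | h
            · subst h; simp
            · rw [if_neg (by omega)]),
          pv_map_eq_replicate _ _ 0 (fun k hk => by rw [if_neg (by omega)])]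
    · have hcast : ((m + 1 : Nat) : Int) = (m : Int) + 1 := by push_cast; ring
      rw [hcast, PySem.List.pyRange_one_succ_right (by omega), List.foldl_append,
          ih (by omega)]
      simp only [List.foldl_cons, List.foldl_nil]
      unfold pvAInit
      simp only
      have hidx : ((m : Int) - 1) = ((m - 1 : Nat) : Int) := by omega
      rw [PySem.List.pySetD_natCast, hidx, PySem.List.pySetD_natCast]
      rw [pv_set_map_range _ _ (by omega : m < N + 1),
          pv_set_map_range _ _ (by omega : m - 1 < N)]
      refine congrArg₂ Prod.mk ?_ ?_
      · apply List.map_congr_left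
        intro k hk
        simp only [List.mem_range] at hk
        by_cases h1 : k = m
        · subst h1; rw [if_pos rfl, if_pos (by omega)]
        · rw [if_neg h1]
          by_cases h2 : k < m
          · rw [if_pos h2, if_pos (by omega)]
          · rw [if_neg h2, if_neg (by omega)]
      · apply List.map_congr_left
        intro k hk
        simp only [List.mem_range] at hk
        by_cases h1 : k = m - 1
        · subst h1; rw [if_pos rfl, if_pos (by omega)]
        · rw [if_neg h1]
          by_cases h2 : k + 1 < m
          · rw [if_pos h2, if_pos (by omega)]
          · rw [if_neg h2, if_neg (by omega)]


lemma pvF_zero : pvF 0 = 0 := by simp [pvF]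
lemma pvF_one : pvF 1 = 1 := by simp [pvF, Nat.minFac_one]
lemma pvG_one : pvG 1 = 1 := by simp [pvG, Nat.minFac_one]

lemma pv_A (N : Nat) : compute_degrees (N : Int) = (List.range N).map (fun k => (pvG (k + 1) : Int)) := by
  unfold compute_degrees
  simp only [PySem.List.pyRepeat_singleton]
  have h1 : ((N : Int) + 1).toNat = N + 1 := by omega
  have h2 : ((N : Int)).toNat = N := by omega
  rw [h1, h2]
  have hc : ((N : Int) + 1) = ((N + 1 : Nat) : Int) := by push_cast; ring
  rw [hc, pv_init N (N + 1) (le_refl _)]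
  rcases Nat.eq_zero_or_pos N with hN | hN
  · subst hN
    rw [PySem.List.pyRange_one_eq_nil (by norm_num)]
    rfl
  · have hdp : (List.range (N + 1)).map (fun k => if k < N + 1 then (k : Int) else 0) =
        pvDpL N 2 2 := by
      unfold pvDpL
      apply List.map_congr_left
      intro k hk
      simp only [List.mem_range] at hk
      rw [if_pos (by omega)]
      match k with
      | 0 => rw [if_pos (by omega), pvF_zero]
      | 1 => rw [if_pos (by omega), pvF_one]
      | 2 => rw [if_neg (by omega), if_pos rfl]; norm_num
      | (k + 3) => rw [if_neg (by omega), if_neg (by omega)]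
    have hdeg : (List.range N).map (fun k => if k + 1 < N + 1 then (1 : Int) else 0) =
        pvDegL N 2 1 := by
      unfold pvDegL
      apply List.map_congr_left
      intro k hk
      simp only [List.mem_range] at hk
      rw [if_pos (by omega)]
      match k with
      | 0 => rw [if_pos (by omega), pvG_one]; norm_num
      | (k + 1) => rw [if_neg (by omega)]; split_ifs <;> rfl
    rw [hdp, hdeg, pv_outer N (N + 1) (by omega) (le_refl _)]
    show pvDegL N (N + 1) 1 = _
    unfold pvDegL
    apply List.map_congr_left
    intro k hk
    simp only [List.mem_range] at hk
    rw [if_pos (by omega)]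


lemma pv_search (m : Nat) (hm : 1 ≤ m) : ∀ fuel : Nat, ∀ d : Nat, 2 ≤ d → m + 1 - d ≤ fuel →
    (∀ e, 2 ≤ e → e < d → ¬ e ∣ m) →
    (if PySem.Int.mod (m : Int) (pvSpfSearch (m : Int) (d : Int)) = 0 then
        PySem.Int.floordiv (m : Int) (pvSpfSearch (m : Int) (d : Int)) else 1) = ((m / m.minFac : Nat) : Int) := by
  intro fuel
  induction fuel with
  | zero =>
    intro d hd2 hfuel hmin
    have hmd : m < d := by omega
    rw [pvSpfSearch]
    rw [dif_neg (by
      rintro ⟨hdd, -⟩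
      have : (m : Int) < (d : Int) * (d : Int) := by
        have : (m : Int) < (d : Int) := by exact_mod_cast hmd
        nlinarith
      omega)]
    have hmodm : m % d = m := Nat.mod_eq_of_lt hmd
    rw [PySem.Int.mod_natCast, hmodm, if_neg (by exact_mod_cast (by omega : m ≠ 0))]
    have hm1 : m = 1 := by
      by_contra h
      have hp := Nat.minFac_prime h
      exact hmin m.minFac hp.two_le (by have := Nat.minFac_le (by omega : 0 < m); omega)
        (Nat.minFac_dvd m)
    subst hm1
    simp [Nat.minFac_one]
  | succ fuel ih =>
    intro d hd2 hfuel hmin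
    rw [pvSpfSearch]
    by_cases hc : (d : Int) * (d : Int) ≤ (m : Int) ∧ PySem.Int.mod (m : Int) (d : Int) ≠ 0
    · rw [dif_pos hc]
      have hddm : d * d ≤ m := by exact_mod_cast hc.1
      have hdm : d ≤ m := le_trans (Nat.le_mul_of_pos_left d (by omega)) hddm
      have hdnd : ¬ d ∣ m := by
        intro hdvd
        apply hc.2
        rw [PySem.Int.mod_natCast, Nat.dvd_iff_mod_eq_zero.mp hdvd]
        rfl
      have hcast : ((d : Int) + 1) = ((d + 1 : Nat) : Int) := by push_cast; ring
      rw [hcast]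
      exact ih (d + 1) (by omega) (by omega) (fun e he1 he2 => by
        rcases (by omega : e < d ∨ e = d) with h | h
        · exact hmin e he1 h
        · subst h; exact hdnd)
    · rw [dif_neg hc]
      by_cases hdvd : d ∣ m
      · have hmod0 : PySem.Int.mod (m : Int) (d : Int) = 0 := by
          rw [PySem.Int.mod_natCast, Nat.dvd_iff_mod_eq_zero.mp hdvd]; rfl
        rw [if_pos hmod0, PySem.Int.floordiv_natCast]
        have hm2 : 2 ≤ m := le_trans hd2 (Nat.le_of_dvd (by omega) hdvd)
        have hfle : m.minFac ≤ d := Nat.minFac_le_of_dvd hd2 hdvd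
        have hfge : d ≤ m.minFac := by
          by_contra h
          push Not at h
          exact hmin m.minFac (Nat.minFac_prime (by omega)).two_le h (Nat.minFac_dvd m)
        have : m.minFac = d := by omega
        rw [this]
      · have hmodne : PySem.Int.mod (m : Int) (d : Int) ≠ 0 := by
          rw [PySem.Int.mod_natCast]
          have : m % d ≠ 0 := fun h => hdvd (Nat.dvd_of_mod_eq_zero h)
          exact_mod_cast this
        rw [if_neg hmodne]
        have hdd : m < d * d := by
          by_contra h
          push Not at h
          exact hc ⟨by exact_mod_cast h, hmodne⟩
        have hdiv1 : m / m.minFac = 1 := by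
          rcases (by omega : m = 1 ∨ 2 ≤ m) with h1 | h2
          · subst h1; simp [Nat.minFac_one]
          · have hfge : d ≤ m.minFac := by
              by_contra h
              push Not at h
              exact hmin m.minFac (Nat.minFac_prime (by omega)).two_le h (Nat.minFac_dvd m)
            have hp : m.Prime := by
              by_contra hnp
              have hsq := Nat.minFac_sq_le_self (by omega : 0 < m) hnp
              have : d * d ≤ m.minFac * m.minFac := Nat.mul_le_mul hfge hfge
              nlinarith [hsq]
            rw [hp.minFac_eq, Nat.div_self (by omega)]
        rw [hdiv1]
        rfl


lemma pv_B (N : Nat) : compute_degrees_alt (N : Int) = (List.range N).map (fun k => (pvG (k + 1) : Int)) := by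
  show (PySem.List.pyRange 1 ((N : Int) + 1) 1).foldl
      (fun acc i => acc ++ [if PySem.Int.mod i (pvSpfSearch i 2) = 0 then
        PySem.Int.floordiv i (pvSpfSearch i 2) else 1]) [] = _
  rw [PySem.List.foldl_append_singleton_eq_map]
  rw [PySem.List.pyRange_one]
  rw [List.map_map]
  have hlen : (((N : Int) + 1) - 1).toNat = N := by omega
  rw [hlen]
  apply List.map_congr_left
  intro k hk
  simp only [List.mem_range] at hk
  simp only [Function.comp_apply]
  have hcast : (1 : Int) + (k : Int) = ((k + 1 : Nat) : Int) := by push_cast; ring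
  rw [hcast]
  have hs := pv_search (k + 1) (by omega) (k + 2) 2 (by omega) (by omega)
    (fun e he1 he2 => absurd he2 (by omega))
  rw [show ((2 : Nat) : Int) = (2 : Int) by norm_num] at hs
  rw [hs]
  rfl


-- ===== VERDICT (by name: the statement is the Claim_ definition above) =====
theorem compute_degrees_spec : Claim_equal_compute_degrees := by
  intro n _
  unfold Spec_compute_degrees
  rcases (by omega : 0 ≤ n ∨ n < 0) with hn | hn
  · obtain ⟨N, rfl⟩ : ∃ N : Nat, n = (N : Int) := ⟨n.toNat, (Int.toNat_of_nonneg hn).symm⟩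
    rw [pv_A, pv_B]
  · have hA : compute_degrees n = [] := by
      unfold compute_degrees
      rw [PySem.List.pyRange_one_eq_nil (by omega), PySem.List.pyRange_one_eq_nil (by omega)]
      simp [PySem.List.pyRepeat_singleton, Int.toNat_of_nonpos (by omega : n ≤ 0)]
    have hB : compute_degrees_alt n = [] := by
      unfold compute_degrees_alt
      rw [PySem.List.pyRange_one_eq_nil (by omega)]
      rfl
    rw [hA, hB]
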